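-- pv_equiv track=rewrite | github.com/markxbrooks/MoLib | molib/pdb/structure/kabsch_sander.py | set_turn
-- ===== SOURCE A (Python) =====
-- from typing import Dict, List, Optional, Tuple, Union
--
-- def set_turn(
--     nres: int, nhb: int, hbonds: List[Tuple[int, int]]
-- ) -> Tuple[List[str], List[str], List[str]]:
--     """
--     Identify 3-turn, 4-turn, and 5-turn patterns from H-bonds.
--
--     Based on SetTurn() in hb-calc.C
--
--     Args:
--         nres: Number of residues (1-indexed)
--         nhb: Number of H-bonds
--         hbonds: List of (CO_index, NH_index) tuples
--
--     Returns:
--         Tuple of (t3, t4, t5) arrays, each of length nres+1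
--         Symbols: '>' = CO makes H-bond, '<' = NH makes H-bond,
--                  'X' = both, '3'/'4'/'5' = bracketed residues
--     """
--     t3 = [" "] * (nres + 1)
--     t4 = [" "] * (nres + 1)
--     t5 = [" "] * (nres + 1)
--
--     for co_idx, nh_idx in hbonds:
--         nt = nh_idx - co_idx  # Turn number
--         no = co_idx
--
--         if nt == 3:
--             # 3-turn
--             if t3[no] != "<":
--                 t3[no] = ">"
--             else:
--                 t3[no] = "X"
--
--             # Mark bracketed residues
--             for j in range(no + 1, no + nt):
--                 if t3[j] == " ":
--                     t3[j] = "3"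
--
--             # Mark NH end
--             if t3[no + nt] != "X" and t3[no + nt] != ">":
--                 t3[no + nt] = "<"
--             else:
--                 if t3[no + nt] == ">":
--                     t3[no + nt] = "X"
--
--         elif nt == 4:
--             # 4-turn
--             if t4[no] != "<":
--                 t4[no] = ">"
--             else:
--                 t4[no] = "X"
--
--             for j in range(no + 1, no + nt):
--                 if t4[j] == " ":
--                     t4[j] = "4"
--
--             if t4[no + nt] != "X" and t4[no + nt] != ">":
--                 t4[no + nt] = "<"
--             else:
--                 if t4[no + nt] == ">":
--                     t4[no + nt] = "X"
--
--         elif nt == 5: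
--             # 5-turn
--             if t5[no] != "<":
--                 t5[no] = ">"
--             else:
--                 t5[no] = "X"
--
--             for j in range(no + 1, no + nt):
--                 if t5[j] == " ":
--                     t5[j] = "5"
--
--             if t5[no + nt] != "X" and t5[no + nt] != ">":
--                 t5[no + nt] = "<"
--             else:
--                 if t5[no + nt] == ">":
--                     t5[no + nt] = "X"
--
--     return t3, t4, t5
-- ===== SOURCE B (Python) =====
-- from typing import List, Tuple
--
--
-- def _mark_ends(t: List[str], co: int, nt: int) -> None:
--     t[co] = "X" if t[co] == "<" else ">"
--     e = co + nt
--     t[e] = "X" if t[e] in (">", "X") else "<"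
--
--
-- def _mark_interior(t: List[str], co: int, nt: int) -> None:
--     for j in range(co + 1, co + nt):
--         if t[j] == " ":
--             t[j] = str(nt)
--
--
-- def set_turn(
--     nres: int, nhb: int, hbonds: List[Tuple[int, int]]
-- ) -> Tuple[List[str], List[str], List[str]]:
--     t3 = [" "] * (nres + 1)
--     t4 = [" "] * (nres + 1)
--     t5 = [" "] * (nres + 1)
--     arrays = {3: t3, 4: t4, 5: t5}
--
--     # Pass 1: endpoint marks only ('>', '<', combined to 'X'), in bond order.
--     for co, nh in hbonds:
--         t = arrays.get(nh - co)
--         if t is not None: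
--             _mark_ends(t, co, nh - co)
--
--     # Pass 2: bracketed interior residues, written only into still-blank cells.
--     for co, nh in hbonds:
--         t = arrays.get(nh - co)
--         if t is not None:
--             _mark_interior(t, co, nh - co)
--
--     return t3, t4, t5
-- ===== Notes on version B (the rewrite author's own statement) =====
-- stated objective: alternative
-- what changed: Single per-bond loop that interleaves endpoint and interior marking is split into two separate passes over the bond list (endpoints first, then interiors), with the three nt-cases collapsed into one dict-dispatched helper pair; safe because interior digits only ever fill blank cells and endpoint logic treats digits like blanks.
import Mathlib
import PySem

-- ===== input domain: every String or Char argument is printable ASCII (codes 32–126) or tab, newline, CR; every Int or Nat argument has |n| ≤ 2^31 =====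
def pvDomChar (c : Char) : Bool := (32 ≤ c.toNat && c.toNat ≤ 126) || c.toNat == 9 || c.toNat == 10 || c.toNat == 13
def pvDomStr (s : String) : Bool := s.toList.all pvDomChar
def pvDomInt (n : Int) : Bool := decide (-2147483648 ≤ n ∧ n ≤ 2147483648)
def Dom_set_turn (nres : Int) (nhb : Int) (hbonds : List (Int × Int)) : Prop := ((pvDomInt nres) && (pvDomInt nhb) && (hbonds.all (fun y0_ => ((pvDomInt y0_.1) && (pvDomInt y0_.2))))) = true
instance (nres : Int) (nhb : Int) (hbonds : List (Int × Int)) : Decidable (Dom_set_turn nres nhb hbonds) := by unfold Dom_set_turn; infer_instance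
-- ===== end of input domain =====

-- B replaces A's single per-bond loop (endpoints + interior interleaved, three copied nt-cases)
-- by two separate passes over the bond list — endpoints first, then interior digits — sharing one
-- helper pair; equivalence is about the return value (both Pythons build fresh lists).


-- ===== PORT A =====
-- [" "] * (nres + 1)
def ksBlank (nres : Int) : List String := List.replicate (nres + 1).toNat " "

-- the three copies of A's start-endpoint / interior / end-endpoint code, as one helper each
-- (A repeats the identical code for t3/t4/t5; branches are in A's order)
def epStart (t : List String) (no : Int) : List String :=
  if PySem.List.pyGetD t no "" ≠ "<" then PySem.List.pySetD t no ">"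
  else PySem.List.pySetD t no "X"

def markJ (d : String) (t : List String) (j : Int) : List String :=
  if PySem.List.pyGetD t j "" = " " then PySem.List.pySetD t j d else t

def epEnd (t : List String) (p : Int) : List String :=
  if PySem.List.pyGetD t p "" ≠ "X" ∧ PySem.List.pyGetD t p "" ≠ ">" then PySem.List.pySetD t p "<"
  else if PySem.List.pyGetD t p "" = ">" then PySem.List.pySetD t p "X" else t

-- one iteration of A's `for co_idx, nh_idx in hbonds` loop
def stepA (s : List String × List String × List String) (b : Int × Int) :
    List String × List String × List String :=
  let nt := b.2 - b.1
  let no := b.1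
  if nt = 3 then
    (epEnd ((PySem.List.pyRange (no + 1) (no + nt) 1).foldl (markJ "3") (epStart s.1 no)) (no + nt),
     s.2.1, s.2.2)
  else if nt = 4 then
    (s.1,
     epEnd ((PySem.List.pyRange (no + 1) (no + nt) 1).foldl (markJ "4") (epStart s.2.1 no)) (no + nt),
     s.2.2)
  else if nt = 5 then
    (s.1, s.2.1,
     epEnd ((PySem.List.pyRange (no + 1) (no + nt) 1).foldl (markJ "5") (epStart s.2.2 no)) (no + nt))
  else s

def set_turn (nres : Int) (nhb : Int) (hbonds : List (Int × Int)) :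
    List String × List String × List String :=
  hbonds.foldl stepA (ksBlank nres, ksBlank nres, ksBlank nres)

-- ===== PORT B =====
-- B's _mark_ends helper
def markEnds (t : List String) (co : Int) (nt : Int) : List String :=
  let t1 := if PySem.List.pyGetD t co "" = "<" then PySem.List.pySetD t co "X"
            else PySem.List.pySetD t co ">"
  if PySem.List.pyGetD t1 (co + nt) "" = ">" ∨ PySem.List.pyGetD t1 (co + nt) "" = "X" then
    PySem.List.pySetD t1 (co + nt) "X"
  else PySem.List.pySetD t1 (co + nt) "<"

-- B's _mark_interior helper
def markInterior (t : List String) (co : Int) (nt : Int) : List String :=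
  (PySem.List.pyRange (co + 1) (co + nt) 1).foldl
    (fun u j => if PySem.List.pyGetD u j "" = " " then PySem.List.pySetD u j (PySem.Int.toStr nt) else u) t

-- B's `arrays.get(nh - co)` dispatch, applied to a per-array operation
def ksDispatch (f : List String → Int → Int → List String)
    (s : List String × List String × List String) (b : Int × Int) :
    List String × List String × List String :=
  let nt := b.2 - b.1
  if nt = 3 then (f s.1 b.1 nt, s.2.1, s.2.2)
  else if nt = 4 then (s.1, f s.2.1 b.1 nt, s.2.2)
  else if nt = 5 then (s.1, s.2.1, f s.2.2 b.1 nt)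
  else s

def set_turn_alt (nres : Int) (nhb : Int) (hbonds : List (Int × Int)) :
    List String × List String × List String :=
  hbonds.foldl (ksDispatch markInterior)
    (hbonds.foldl (ksDispatch markEnds) (ksBlank nres, ksBlank nres, ksBlank nres))

-- ===== PRECONDITION & SPEC =====
-- Pre_ excludes exactly the inputs on which Python A raises IndexError: a bond with turn number
-- 3/4/5 whose CO index is below -(nres+1) or whose NH index is above nres.
def Pre_set_turn (nres : Int) (nhb : Int) (hbonds : List (Int × Int)) : Prop :=
  ∀ p ∈ hbonds, (p.2 - p.1 = 3 ∨ p.2 - p.1 = 4 ∨ p.2 - p.1 = 5) →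
    (-(nres + 1) ≤ p.1 ∧ p.2 ≤ nres)
instance (nres : Int) (nhb : Int) (hbonds : List (Int × Int)) : Decidable (Pre_set_turn nres nhb hbonds) := by unfold Pre_set_turn; infer_instance

def pvWitness_set_turn : Int × Int × (List (Int × Int)) := (6, 2, [(0, 3), (1, 5)])

def Spec_set_turn (nres : Int) (nhb : Int) (hbonds : List (Int × Int)) (out : List String × List String × List String) : Prop := out = set_turn_alt nres nhb hbonds
instance (nres : Int) (nhb : Int) (hbonds : List (Int × Int)) (out : List String × List String × List String) : Decidable (Spec_set_turn nres nhb hbonds out) := by unfold Spec_set_turn; infer_instance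

-- ===== CLAIM (what is proved, stated in full; the proofs are below) =====
def Claim_equal_set_turn : Prop := ∀ (nres : Int) (nhb : Int) (hbonds : List (Int × Int)), Dom_set_turn nres nhb hbonds → Pre_set_turn nres nhb hbonds → Spec_set_turn nres nhb hbonds (set_turn nres nhb hbonds)

-- ===== LEMMAS AND PROOFS =====

-- normal forms of the PySem read/write at a possibly negative index
theorem pyIdx?_lt {L : Nat} {i : Int} {k : Nat} (h : PySem.List.pyIdx? L i = some k) : k < L := by
  unfold PySem.List.pyIdx? at h; split_ifs at h <;> simp_all <;> omega

theorem setD_none {t : List String} {i : Int} {v : String}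
    (h : PySem.List.pyIdx? t.length i = none) : PySem.List.pySetD t i v = t := by
  simp [PySem.List.pySetD, PySem.List.pySet?, h]

theorem setD_some {t : List String} {i : Int} {k : Nat} {v : String}
    (h : PySem.List.pyIdx? t.length i = some k) : PySem.List.pySetD t i v = t.set k v := by
  simp [PySem.List.pySetD, PySem.List.pySet?, h]

theorem getD_some {t : List String} {i : Int} {k : Nat}
    (h : PySem.List.pyIdx? t.length i = some k) :
    PySem.List.pyGetD t i "" = t.getD k "" := by
  simp [PySem.List.pyGetD, PySem.List.pyGet?, h, List.getD_eq_getElem?_getD]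

theorem set_self (t : List String) (k : Nat) : t.set k (t.getD k "") = t := by
  by_cases hk : k < t.length
  · rw [List.getD_eq_getElem?_getD, List.getElem?_eq_getElem hk]
    exact List.set_getElem_self hk
  · exact List.set_eq_of_length_le (by omega)

theorem getD_set_self (t : List String) (k : Nat) (v : String) (h : k < t.length) :
    (t.set k v).getD k "" = v := by
  rw [List.getD_eq_getElem?_getD, List.getElem?_set_self (by omega)]; rfl

theorem getD_set_ne (t : List String) {k m : Nat} (v : String) (h : k ≠ m) :
    (t.set k v).getD m "" = t.getD m "" := by
  rw [List.getD_eq_getElem?_getD, List.getElem?_set_ne h, ← List.getD_eq_getElem?_getD]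

-- single-cell update with a transition function F (none = no write), and its applied value
def updF (F : String → Option String) (t : List String) (i : Int) : List String :=
  match F (PySem.List.pyGetD t i "") with
  | some v => PySem.List.pySetD t i v
  | none => t

def appF (F : String → Option String) (x : String) : String := (F x).getD x

theorem updF_none {F : String → Option String} {t : List String} {i : Int}
    (h : PySem.List.pyIdx? t.length i = none) : updF F t i = t := by
  unfold updF
  cases hF : F (PySem.List.pyGetD t i "") with
  | none => rfl
  | some v => exact setD_none h

theorem updF_some {F : String → Option String} {t : List String} {i : Int} {k : Nat}
    (h : PySem.List.pyIdx? t.length i = some k) :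
    updF F t i = t.set k (appF F (t.getD k "")) := by
  unfold updF
  rw [getD_some h]
  cases hF : F (t.getD k "") with
  | none =>
      have e1 : appF F (t.getD k "") = t.getD k "" := by unfold appF; rw [hF]; rfl
      rw [e1, set_self]
  | some v =>
      have e1 : appF F (t.getD k "") = v := by unfold appF; rw [hF]; rfl
      rw [e1]; exact setD_some h

theorem length_updF (F : String → Option String) (t : List String) (i : Int) :
    (updF F t i).length = t.length := by
  unfold updF
  cases F (PySem.List.pyGetD t i "") with
  | none => rfl
  | some v => exact PySem.List.length_pySetD ..

theorem updF_congr_app {F G : String → Option String} (h : ∀ x, appF F x = appF G x)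
    (t : List String) (i : Int) : updF F t i = updF G t i := by
  cases hk : PySem.List.pyIdx? t.length i with
  | none => rw [updF_none hk, updF_none hk]
  | some k => rw [updF_some hk, updF_some hk, h]

theorem updF_comm {F G : String → Option String}
    (h : ∀ x, appF G (appF F x) = appF F (appF G x))
    (t : List String) (i j : Int) : updF G (updF F t i) j = updF F (updF G t j) i := by
  cases hki : PySem.List.pyIdx? t.length i with
  | none =>
      rw [updF_none hki,
          updF_none (show PySem.List.pyIdx? (updF G t j).length i = none by
            rw [length_updF]; exact hki)]
  | some ki =>
      cases hkj : PySem.List.pyIdx? t.length j with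
      | none =>
          rw [updF_none hkj,
              updF_none (show PySem.List.pyIdx? (updF F t i).length j = none by
                rw [length_updF]; exact hkj)]
      | some kj =>
          have hi : ki < t.length := pyIdx?_lt hki
          have hj : kj < t.length := pyIdx?_lt hkj
          rw [updF_some hki, updF_some hkj,
              updF_some (show PySem.List.pyIdx? (t.set ki _).length j = some kj by
                rw [List.length_set]; exact hkj),
              updF_some (show PySem.List.pyIdx? (t.set kj _).length i = some ki by
                rw [List.length_set]; exact hki)]
          by_cases hk : ki = kj
          · subst hk
            rw [getD_set_self t ki _ hi, getD_set_self t ki _ hi, List.set_set, List.set_set, h]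
          · rw [getD_set_ne t _ hk, getD_set_ne t _ (Ne.symm hk), List.set_comm _ _ hk]

-- the three write operations are updF updates
def Fstart : String → Option String := fun x => some (if x = "<" then "X" else ">")
def Fend : String → Option String :=
  fun x => if x ≠ "X" ∧ x ≠ ">" then some "<" else if x = ">" then some "X" else none
def FendB : String → Option String := fun x => some (if x = ">" ∨ x = "X" then "X" else "<")
def Fmark (d : String) : String → Option String := fun x => if x = " " then some d else none

theorem epStart_eq (t : List String) (no : Int) : epStart t no = updF Fstart t no := by
  by_cases h : PySem.List.pyGetD t no "" = "<" <;> simp [epStart, updF, Fstart, h]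

theorem epEnd_eq (t : List String) (p : Int) : epEnd t p = updF Fend t p := by
  unfold epEnd updF Fend
  split_ifs <;> simp_all

theorem markJ_eq (d : String) (t : List String) (j : Int) : markJ d t j = updF (Fmark d) t j := by
  by_cases h : PySem.List.pyGetD t j "" = " " <;> simp [markJ, updF, Fmark, h]

theorem appF_end_eq (x : String) : appF Fend x = appF FendB x := by
  unfold appF Fend FendB
  split_ifs <;> simp_all

theorem updFstart_unfold (t : List String) (co : Int) :
    updF Fstart t co =
      if PySem.List.pyGetD t co "" = "<" then PySem.List.pySetD t co "X"
      else PySem.List.pySetD t co ">" := by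
  by_cases h : PySem.List.pyGetD t co "" = "<" <;> simp [updF, Fstart, h]

theorem updFendB_unfold (u : List String) (e : Int) :
    updF FendB u e =
      if PySem.List.pyGetD u e "" = ">" ∨ PySem.List.pyGetD u e "" = "X" then
        PySem.List.pySetD u e "X"
      else PySem.List.pySetD u e "<" := by
  by_cases h : PySem.List.pyGetD u e "" = ">" ∨ PySem.List.pyGetD u e "" = "X" <;>
    simp [updF, FendB, h]

theorem markEnds_eq (t : List String) (co nt : Int) :
    markEnds t co nt = updF Fend (updF Fstart t co) (co + nt) := by
  rw [updF_congr_app appF_end_eq, updFendB_unfold, updFstart_unfold]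
  rfl

-- a digit never collides with the arrow symbols
def goodD (d : String) : Prop := d ≠ " " ∧ d ≠ "<" ∧ d ≠ ">" ∧ d ≠ "X"

theorem app_comm_start {d : String} (hd : goodD d) (x : String) :
    appF Fstart (appF (Fmark d) x) = appF (Fmark d) (appF Fstart x) := by
  obtain ⟨h1, h2, h3, h4⟩ := hd
  unfold appF Fstart Fmark
  split_ifs <;> simp_all

theorem app_comm_end {d : String} (hd : goodD d) (x : String) :
    appF Fend (appF (Fmark d) x) = appF (Fmark d) (appF Fend x) := by
  obtain ⟨h1, h2, h3, h4⟩ := hd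
  unfold appF Fend Fmark
  split_ifs <;> simp_all

-- commuting one endpoint write past the whole interior loop
theorem comm_updF_foldl {F : String → Option String} {d : String}
    (h : ∀ x, appF F (appF (Fmark d) x) = appF (Fmark d) (appF F x))
    (l : List Int) (t : List String) (p : Int) :
    updF F (l.foldl (markJ d) t) p = l.foldl (markJ d) (updF F t p) := by
  induction l generalizing t with
  | nil => rfl
  | cons j l ih =>
      simp only [List.foldl_cons]
      rw [markJ_eq, markJ_eq, ih, updF_comm h]

-- markInterior is an interior fold of markJ with digit str(nt)
theorem markInterior_eq (t : List String) (co nt : Int) :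
    markInterior t co nt =
      (PySem.List.pyRange (co + 1) (co + nt) 1).foldl (markJ (PySem.Int.toStr nt)) t := by
  rfl

theorem goodD_toStr3 : goodD (PySem.Int.toStr 3) := by unfold goodD; decide
theorem goodD_toStr4 : goodD (PySem.Int.toStr 4) := by unfold goodD; decide
theorem goodD_toStr5 : goodD (PySem.Int.toStr 5) := by unfold goodD; decide

theorem goodD_cases {nt : Int} (h : nt = 3 ∨ nt = 4 ∨ nt = 5) : goodD (PySem.Int.toStr nt) := by
  rcases h with h | h | h <;> subst h
  · exact goodD_toStr3
  · exact goodD_toStr4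
  · exact goodD_toStr5

-- per-array form of one whole bond step of A
theorem opA_eq {nt : Int} (h : nt = 3 ∨ nt = 4 ∨ nt = 5) (t : List String) (co : Int) :
    epEnd ((PySem.List.pyRange (co + 1) (co + nt) 1).foldl (markJ (PySem.Int.toStr nt)) (epStart t co)) (co + nt)
      = markInterior (markEnds t co nt) co nt := by
  rw [markInterior_eq, markEnds_eq, epEnd_eq, epStart_eq,
      comm_updF_foldl (app_comm_end (goodD_cases h))]

-- endpoint marks of one bond commute past interior marks of another bond on the same array
theorem comm_ends_interior {nt : Int} (h : nt = 3 ∨ nt = 4 ∨ nt = 5)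
    (t : List String) (co co' : Int) :
    markEnds (markInterior t co' nt) co nt = markInterior (markEnds t co nt) co' nt := by
  have hd := goodD_cases h
  rw [markInterior_eq, markInterior_eq, markEnds_eq, markEnds_eq,
      comm_updF_foldl (app_comm_start hd), comm_updF_foldl (app_comm_end hd)]

-- one step of A = endpoint step then interior step of B, for the same bond
theorem stepA_eq (s : List String × List String × List String) (b : Int × Int) :
    stepA s b = ksDispatch markInterior (ksDispatch markEnds s b) b := by
  unfold stepA ksDispatch
  by_cases h3 : b.2 - b.1 = 3
  · simp only [h3, if_pos rfl, reduceIte]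
    have := opA_eq (nt := 3) (Or.inl rfl) s.1 b.1
    simp only [show PySem.Int.toStr 3 = "3" from rfl] at this
    simp [this]
  · by_cases h4 : b.2 - b.1 = 4
    · simp only [h3, h4, if_neg, if_pos rfl, reduceIte]
      have := opA_eq (nt := 4) (Or.inr (Or.inl rfl)) s.2.1 b.1
      simp only [show PySem.Int.toStr 4 = "4" from rfl] at this
      simp [this, h3]
    · by_cases h5 : b.2 - b.1 = 5
      · simp only [h3, h4, h5, reduceIte]
        have := opA_eq (nt := 5) (Or.inr (Or.inr rfl)) s.2.2 b.1
        simp only [show PySem.Int.toStr 5 = "5" from rfl] at this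
        simp [this, h3, h4]
      · simp [h3, h4, h5]

-- endpoint step of one bond commutes past interior step of another bond
theorem cei3 (t : List String) (co co' : Int) :
    markEnds (markInterior t co' 3) co 3 = markInterior (markEnds t co 3) co' 3 :=
  comm_ends_interior (Or.inl rfl) t co co'

theorem cei4 (t : List String) (co co' : Int) :
    markEnds (markInterior t co' 4) co 4 = markInterior (markEnds t co 4) co' 4 :=
  comm_ends_interior (Or.inr (Or.inl rfl)) t co co'

theorem cei5 (t : List String) (co co' : Int) :
    markEnds (markInterior t co' 5) co 5 = markInterior (markEnds t co 5) co' 5 :=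
  comm_ends_interior (Or.inr (Or.inr rfl)) t co co'

theorem comm_dispatch (s : List String × List String × List String) (b b' : Int × Int) :
    ksDispatch markEnds (ksDispatch markInterior s b') b
      = ksDispatch markInterior (ksDispatch markEnds s b) b' := by
  unfold ksDispatch
  by_cases h3 : b.2 - b.1 = 3 <;> by_cases h4 : b.2 - b.1 = 4 <;> by_cases h5 : b.2 - b.1 = 5 <;>
    by_cases g3 : b'.2 - b'.1 = 3 <;> by_cases g4 : b'.2 - b'.1 = 4 <;> by_cases g5 : b'.2 - b'.1 = 5 <;>
    simp only [h3, h4, h5, g3, g4, g5, reduceIte] <;>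
    first
      | rfl
      | omega
      | simp [cei3, cei4, cei5]

theorem comm_dispatch_fold (bs : List (Int × Int)) (s : List String × List String × List String)
    (b : Int × Int) :
    bs.foldl (ksDispatch markEnds) (ksDispatch markInterior s b)
      = ksDispatch markInterior (bs.foldl (ksDispatch markEnds) s) b := by
  induction bs generalizing s with
  | nil => rfl
  | cons b' bs ih =>
      simp only [List.foldl_cons]
      rw [comm_dispatch, ih]

theorem main_fold (bs : List (Int × Int)) (s : List String × List String × List String) :
    bs.foldl stepA s = bs.foldl (ksDispatch markInterior) (bs.foldl (ksDispatch markEnds) s) := by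
  induction bs generalizing s with
  | nil => rfl
  | cons b bs ih =>
      simp only [List.foldl_cons]
      rw [ih (stepA s b), stepA_eq, comm_dispatch_fold]

-- ===== VERDICT (by name: the statement is the Claim_ definition above) =====
theorem set_turn_spec : Claim_equal_set_turn := by
  intro nres nhb hbonds _ _
  unfold Spec_set_turn set_turn set_turn_alt
  exact main_fold hbonds _
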